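-- pv_equiv track=rewrite | github.com/TiksGal/CodeAcademy | 02.15/thhird.py | check_bigrams
-- ===== SOURCE A (Python) =====
-- from typing import List
--
-- def check_bigrams(bigrams: List[str], words: List[str]) -> bool:
--     for bigram in bigrams:
--         found = False
--         for word in words:
--             if bigram in word:
--                 found = True
--                 break
--         if not found:
--             return False
--     return True
-- ===== SOURCE B (Python) =====
-- def check_bigrams(bigrams, words):
--     remaining = set(bigrams)
--     for word in words:
--         for bg in list(remaining):
--             if bg in word:
--                 remaining.discard(bg)
--         if not remaining:
--             return True
--     return not remaining
-- ===== Notes on version B (the rewrite author's own statement) =====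
-- stated objective: alternative
-- what changed: Inverted the loop nesting: B walks words once keeping a shrinking set of still-unmatched bigrams (deduplicated up front) and returns True as soon as it empties, instead of A's per-bigram rescan of all words.
import Mathlib
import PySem

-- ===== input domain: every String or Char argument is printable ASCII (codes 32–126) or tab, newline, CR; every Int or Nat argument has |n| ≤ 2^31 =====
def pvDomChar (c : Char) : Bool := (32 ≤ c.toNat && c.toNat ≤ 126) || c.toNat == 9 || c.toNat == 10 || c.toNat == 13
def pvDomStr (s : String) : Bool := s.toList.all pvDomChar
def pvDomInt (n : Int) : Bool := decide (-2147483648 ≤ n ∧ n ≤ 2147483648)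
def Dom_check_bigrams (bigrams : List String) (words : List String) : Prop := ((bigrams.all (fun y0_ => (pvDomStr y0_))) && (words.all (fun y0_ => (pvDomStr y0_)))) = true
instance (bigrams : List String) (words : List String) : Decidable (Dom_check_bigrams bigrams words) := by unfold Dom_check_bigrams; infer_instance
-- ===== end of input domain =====

-- B inverts the loop nesting: one pass over words maintaining a shrinking set of
-- still-unmatched bigrams (with early exit), instead of A's per-bigram scan of all words.


-- ===== PORT A =====
-- inner loop: 'found = False; for word in words: if bigram in word: found = True; break'
def pvFindWord (bigram : String) (words : List String) : Bool :=
  match words with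
  | [] => false
  | w :: ws => if PySem.Str.isIn bigram w then true else pvFindWord bigram ws

def check_bigrams (bigrams : List String) (words : List String) : Bool :=
  match bigrams with
  | [] => true
  | b :: bs => if pvFindWord b words then check_bigrams bs words else false

-- ===== PORT B =====
-- 'for word in words: discard matched bigrams from remaining; return True when empty'
def pvAltLoop (remaining : PySem.Set String) (words : List String) : Bool :=
  match words with
  | [] => remaining.isEmpty
  | w :: ws =>
    let r := remaining.filter (fun bg => !(PySem.Str.isIn bg w))
    if r.isEmpty then true else pvAltLoop r ws

def check_bigrams_alt (bigrams : List String) (words : List String) : Bool :=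
  pvAltLoop (PySem.Set.ofList bigrams) words

-- ===== PRECONDITION & SPEC =====
def Spec_check_bigrams (bigrams : List String) (words : List String) (out : Bool) : Prop := out = check_bigrams_alt bigrams words
instance (bigrams : List String) (words : List String) (out : Bool) : Decidable (Spec_check_bigrams bigrams words out) := by unfold Spec_check_bigrams; infer_instance

-- ===== CLAIM (what is proved, stated in full; the proofs are below) =====
def Claim_equal_check_bigrams : Prop := ∀ (bigrams : List String) (words : List String), Dom_check_bigrams bigrams words → Spec_check_bigrams bigrams words (check_bigrams bigrams words)

-- ===== LEMMAS AND PROOFS =====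

-- inner loop of A as a disjunction
theorem findWord_cons (b w : String) (ws : List String) :
    pvFindWord b (w :: ws) = (PySem.Str.isIn b w || pvFindWord b ws) := by
  simp only [pvFindWord]
  cases PySem.Str.isIn b w <;> simp

-- A's outer loop is List.all of its inner loop
theorem checkA_eq_all (bigrams words : List String) :
    check_bigrams bigrams words = bigrams.all (fun b => pvFindWord b words) := by
  induction bigrams with
  | nil => rfl
  | cons b bs ih => cases h : pvFindWord b words <;> simp [check_bigrams, h, ih]

-- all over a filter: the removed elements satisfied Q, i.e. the disjunct
theorem all_filter_or (P Q : String → Bool) (rs : List String) :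
    (rs.filter (fun bg => !(Q bg))).all P = rs.all (fun bg => Q bg || P bg) := by
  induction rs with
  | nil => rfl
  | cons r rs ih => cases h : Q r <;> simp [h, ih]

-- B's loop decides 'every remaining bigram occurs in some word'
theorem altLoop_eq_all (words : List String) :
    ∀ rs : List String, pvAltLoop rs words = rs.all (fun b => pvFindWord b words) := by
  induction words with
  | nil =>
    intro rs
    cases rs <;> simp only [pvAltLoop, pvFindWord, List.isEmpty_nil, List.isEmpty_cons,
      List.all_nil, List.all_cons, Bool.false_and]
  | cons w ws ih =>
    intro rs
    have hkey : rs.all (fun b => pvFindWord b (w :: ws))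
        = (rs.filter (fun bg => !(PySem.Str.isIn bg w))).all (fun b => pvFindWord b ws) := by
      rw [all_filter_or (fun b => pvFindWord b ws) (fun bg => PySem.Str.isIn bg w) rs]
      simp only [findWord_cons]
    unfold pvAltLoop
    by_cases h : (rs.filter (fun bg => !(PySem.Str.isIn bg w))).isEmpty = true
    · rw [if_pos h, hkey, List.isEmpty_iff.mp h, List.all_nil]
    · rw [if_neg h, ih, hkey]

-- dedup is harmless for an 'all'
theorem all_ofList (P : String → Bool) (xs : List String) :
    (PySem.Set.ofList xs).all P = xs.all P := by
  rw [Bool.eq_iff_iff]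
  simp only [List.all_eq_true, PySem.Set.mem_ofList]

-- ===== VERDICT (by name: the statement is the Claim_ definition above) =====
theorem check_bigrams_spec : Claim_equal_check_bigrams := by
  intro bigrams words _
  unfold Spec_check_bigrams check_bigrams_alt
  rw [checkA_eq_all, altLoop_eq_all, all_ofList]
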